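-- pv_equiv track=rewrite | github.com/Abjad/abjad | abjad/tools/sequencetools/truncate_sequence_to_sum.py | truncate_sequence_to_sum
-- ===== SOURCE A (Python) =====
-- def truncate_sequence_to_sum(sequence, target_sum):
--     '''Truncate `sequence` to `target_sum`:
--
--     ::
--
--         >>> sequence = [-1, 2, -3, 4, -5, 6, -7, 8, -9, 10]
--
--     ::
--
--         >>> for n in range(10):
--         ...     print n, sequencetools.truncate_sequence_to_sum(sequence, n)
--         ...
--         0 []
--         1 [-1, 2]
--         2 [-1, 2, -3, 4]
--         3 [-1, 2, -3, 4, -5, 6]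
--         4 [-1, 2, -3, 4, -5, 6, -7, 8]
--         5 [-1, 2, -3, 4, -5, 6, -7, 8, -9, 10]
--         6 [-1, 2, -3, 4, -5, 6, -7, 8, -9, 10]
--         7 [-1, 2, -3, 4, -5, 6, -7, 8, -9, 10]
--         8 [-1, 2, -3, 4, -5, 6, -7, 8, -9, 10]
--         9 [-1, 2, -3, 4, -5, 6, -7, 8, -9, 10]
--
--     Returns empty list when `target_sum` is ``0``:
--
--     ::
--
--         >>> sequencetools.truncate_sequence_to_sum([1, 2, 3, 4, 5], 0)
--         []
--
--     Raise type error when `sequence` is not a list.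
--
--     Raise value error on negative `target_sum`.
--
--     Returns new list.
--     '''
--
--     if not isinstance(sequence, list):
--         raise TypeError
--
--     total = target_sum
--
--     if total < 0:
--         raise ValueError
--
--     result = []
--
--     if total == 0:
--         return result
--
--     accumulation = 0
--     for e in sequence:
--         accumulation += e
--         if accumulation < total:
--             result.append(e)
--         else:
--             result.append(total - sum(result))
--             break
--
--     return result
-- ===== SOURCE B (Python) =====
-- def truncate_sequence_to_sum(sequence, target_sum):
--     if not isinstance(sequence, list):
--         raise TypeError
--     if target_sum < 0:
--         raise ValueError
--     if target_sum == 0: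
--         return []
--     return _truncate(sequence, target_sum)[0]
--
-- def _truncate(seq, remaining):
--     # remaining > 0. Returns (truncated list, True iff the budget was reached).
--     if not seq:
--         return [], False
--     if len(seq) == 1:
--         e = seq[0]
--         if e >= remaining:
--             return [remaining], True
--         return [e], False
--     mid = len(seq) // 2
--     left, right = seq[:mid], seq[mid:]
--     lres, ldone = _truncate(left, remaining)
--     if ldone:
--         return lres, True
--     # budget not reached in left, so lres == left
--     rres, rdone = _truncate(right, remaining - sum(left))
--     return lres + rres, rdone
-- ===== Notes on version B (the rewrite author's own statement) =====
-- stated objective: alternative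
-- what changed: B is a divide-and-conquer recursion: it splits the sequence in half, truncates the left half against the budget, and only if the budget was not reached truncates the right half against the budget minus the left sum, instead of A's single loop that accumulates a running total while growing a result list and re-summing it at the break; Pre_ excludes only negative target_sum, where A raises ValueError (B raises too).
import Mathlib
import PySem

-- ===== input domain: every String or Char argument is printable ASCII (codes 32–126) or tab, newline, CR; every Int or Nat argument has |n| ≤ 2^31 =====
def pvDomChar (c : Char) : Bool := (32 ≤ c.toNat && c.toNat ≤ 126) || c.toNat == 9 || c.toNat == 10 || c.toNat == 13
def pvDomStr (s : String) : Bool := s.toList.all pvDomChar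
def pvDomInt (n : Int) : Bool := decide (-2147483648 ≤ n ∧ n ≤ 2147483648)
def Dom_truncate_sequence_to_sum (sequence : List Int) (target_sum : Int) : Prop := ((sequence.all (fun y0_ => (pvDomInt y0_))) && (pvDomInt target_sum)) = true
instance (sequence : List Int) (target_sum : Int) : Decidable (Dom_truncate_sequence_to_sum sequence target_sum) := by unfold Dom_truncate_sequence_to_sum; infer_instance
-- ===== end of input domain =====

-- B replaces A's accumulate-and-resum loop by a divide-and-conquer recursion on halves of the
-- sequence (objective: alternative algorithm; same values everywhere the claim covers).

-- ===== PORT A =====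
-- A's for-loop: state is (accumulation, result); at the break it appends total - sum(result).
def pvALoop (total : Int) : List Int → Int → List Int → List Int
  | [], _, result => result
  | e :: rest, accumulation, result =>
    let acc' := accumulation + e
    if acc' < total then pvALoop total rest acc' (result ++ [e])
    else result ++ [total - result.sum]

def truncate_sequence_to_sum (sequence : List Int) (target_sum : Int) : List Int :=
  if target_sum = 0 then [] else pvALoop target_sum sequence 0 []

-- ===== PORT B =====
-- B's _truncate: divide and conquer; returns (truncated list, budget-reached flag).
def pvBT : List Int → Int → List Int × Bool
  | [], _ => ([], false)
  | [e], remaining => if e ≥ remaining then ([remaining], true) else ([e], false)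
  | e₀ :: e₁ :: rest, remaining =>
    let seq := e₀ :: e₁ :: rest
    let mid := seq.length / 2
    let left := seq.take mid
    let right := seq.drop mid
    let lr := pvBT left remaining
    if lr.2 then lr
    else
      let rr := pvBT right (remaining - left.sum)
      (lr.1 ++ rr.1, rr.2)
termination_by seq _ => seq.length
decreasing_by
  · simp [List.length_take]; omega
  · simp [List.length_drop]; omega

def truncate_sequence_to_sum_alt (sequence : List Int) (target_sum : Int) : List Int :=
  if target_sum = 0 then [] else (pvBT sequence target_sum).1

-- ===== PRECONDITION & SPEC =====
-- A raises ValueError on negative target_sum; Pre_ excludes exactly those inputs (B raises there too).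
def Pre_truncate_sequence_to_sum (sequence : List Int) (target_sum : Int) : Prop := 0 ≤ target_sum
instance (sequence : List Int) (target_sum : Int) : Decidable (Pre_truncate_sequence_to_sum sequence target_sum) := by unfold Pre_truncate_sequence_to_sum; infer_instance
def pvWitness_truncate_sequence_to_sum : List Int × Int := ([-1, 2, -3, 4], 2)

def Spec_truncate_sequence_to_sum (sequence : List Int) (target_sum : Int) (out : List Int) : Prop := out = truncate_sequence_to_sum_alt sequence target_sum
instance (sequence : List Int) (target_sum : Int) (out : List Int) : Decidable (Spec_truncate_sequence_to_sum sequence target_sum out) := by unfold Spec_truncate_sequence_to_sum; infer_instance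

-- ===== CLAIM (what is proved, stated in full; the proofs are below) =====
def Claim_equal_truncate_sequence_to_sum : Prop := ∀ (sequence : List Int) (target_sum : Int), Dom_truncate_sequence_to_sum sequence target_sum → Pre_truncate_sequence_to_sum sequence target_sum → Spec_truncate_sequence_to_sum sequence target_sum (truncate_sequence_to_sum sequence target_sum)

-- ===== LEMMAS AND PROOFS =====
-- Reference recursion: the left-to-right truncation with a budget, plus a done flag.
def pvRef : List Int → Int → List Int × Bool
  | [], _ => ([], false)
  | e :: rest, remaining =>
    if e ≥ remaining then ([remaining], true)
    else
      let r := pvRef rest (remaining - e)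
      (e :: r.1, r.2)

-- pvRef splits over append: try the left part first, then the right with the reduced budget.
theorem pvRef_append (l r : List Int) : ∀ remaining : Int,
    pvRef (l ++ r) remaining =
      (if (pvRef l remaining).2 then pvRef l remaining
       else ((pvRef l remaining).1 ++ (pvRef r (remaining - l.sum)).1,
             (pvRef r (remaining - l.sum)).2)) := by
  induction l with
  | nil => intro remaining; simp [pvRef]
  | cons e l ih =>
    intro remaining
    simp only [List.cons_append, pvRef]
    by_cases he : e ≥ remaining
    · simp [he]
    · rw [if_neg he, if_neg he]
      rw [ih (remaining - e)]
      by_cases hd : (pvRef l (remaining - e)).2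
      · simp [hd]
      · simp only [hd, if_false, Bool.false_eq_true]
        have hsum : remaining - e - l.sum = remaining - (e :: l).sum := by
          simp [List.sum_cons]; ring
        simp [hsum]

-- B's divide and conquer computes pvRef (strong induction on length).
theorem pvBT_eq_ref_aux (n : Nat) : ∀ (seq : List Int), seq.length ≤ n →
    ∀ remaining : Int, pvBT seq remaining = pvRef seq remaining := by
  induction n with
  | zero =>
    intro seq hlen remaining
    have : seq = [] := List.eq_nil_of_length_eq_zero (Nat.le_zero.mp hlen)
    subst this; simp [pvBT, pvRef]
  | succ n ih =>
    intro seq hlen remaining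
    match seq with
    | [] => simp [pvBT, pvRef]
    | [e] => by_cases he : e ≥ remaining <;> simp [pvBT, pvRef, he]
    | e₀ :: e₁ :: rest =>
      rw [pvBT]
      simp only []
      have hL : (e₀ :: e₁ :: rest).length = rest.length + 2 := by simp
      rw [ih _ (by rw [List.length_take]; omega),
          ih _ (by rw [List.length_drop]; omega)]
      have hsplit := pvRef_append ((e₀ :: e₁ :: rest).take ((e₀ :: e₁ :: rest).length / 2))
        ((e₀ :: e₁ :: rest).drop ((e₀ :: e₁ :: rest).length / 2)) remaining
      rw [List.take_append_drop] at hsplit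
      rw [hsplit]

theorem pvBT_eq_ref (seq : List Int) (remaining : Int) :
    pvBT seq remaining = pvRef seq remaining :=
  pvBT_eq_ref_aux seq.length seq (le_refl _) remaining

-- A's loop equals the emitted prefix followed by pvRef on the remaining budget.
theorem pvALoop_eq_ref (total : Int) (rest : List Int) :
    ∀ (result : List Int), pvALoop total rest result.sum result
      = result ++ (pvRef rest (total - result.sum)).1 := by
  induction rest with
  | nil => intro result; simp [pvALoop, pvRef]
  | cons e rest ih =>
    intro result
    simp only [pvALoop, pvRef]
    by_cases h : result.sum + e < total
    · rw [if_pos h, if_neg (by omega)]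
      have := ih (result ++ [e])
      simp only [List.sum_append, List.sum_cons, List.sum_nil, add_zero] at this
      rw [this, List.append_assoc]
      have he : total - (result.sum + e) = total - result.sum - e := by ring
      rw [he]
      rfl
    · rw [if_neg h, if_pos (by omega)]

-- ===== VERDICT (by name: the statement is the Claim_ definition above) =====
theorem truncate_sequence_to_sum_spec : Claim_equal_truncate_sequence_to_sum := by
  intro sequence target_sum _ _
  unfold Spec_truncate_sequence_to_sum truncate_sequence_to_sum truncate_sequence_to_sum_alt
  by_cases h : target_sum = 0
  · simp [h]
  · rw [if_neg h, if_neg h, pvBT_eq_ref]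
    have := pvALoop_eq_ref target_sum sequence []
    simpa using this
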